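-- pv_equiv track=rewrite | github.com/OrlandoMts/python-basic | 01-intro/05_tipos-avanzados/ejercicio.py | countItemRepeated
-- ===== SOURCE A (Python) =====
-- def countItemRepeated(data):
--     data.sort(key=lambda item: item[1])
--     last_item = data[-1][1]
--     result = []
--
--     for item in data:
--         if item[1] == last_item:
--             result.append(item)
--
--     return result
-- ===== SOURCE B (Python) =====
-- def countItemRepeated(data):
--     top = max(item[1] for item in data)
--     return [item for item in data if item[1] == top]
-- ===== Notes on version B (the rewrite author's own statement) =====
-- stated objective: simpler
-- what changed: B replaces sort-then-index-last-then-filter-the-sorted-list with a single max over the second elements followed by one filtering pass over the original list (no sort; B also does not mutate the input list, while A sorts it in place).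
-- outside the precondition, e.g. on countItemRepeated([]): A raises IndexError, B raises ValueError
import Mathlib
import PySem

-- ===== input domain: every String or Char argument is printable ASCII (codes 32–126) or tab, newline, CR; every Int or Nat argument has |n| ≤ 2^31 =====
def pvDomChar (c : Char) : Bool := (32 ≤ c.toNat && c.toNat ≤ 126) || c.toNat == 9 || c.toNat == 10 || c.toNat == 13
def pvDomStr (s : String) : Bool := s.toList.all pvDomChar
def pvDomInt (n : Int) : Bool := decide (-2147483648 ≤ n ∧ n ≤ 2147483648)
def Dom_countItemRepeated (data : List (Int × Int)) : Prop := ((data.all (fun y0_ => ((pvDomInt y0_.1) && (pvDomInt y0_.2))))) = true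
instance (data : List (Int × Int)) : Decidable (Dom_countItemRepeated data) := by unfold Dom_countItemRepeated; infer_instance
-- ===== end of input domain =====

-- B computes the max of the second elements in one pass and filters, instead of sorting,
-- indexing the last element and filtering the sorted list; equivalence is about the RETURN
-- value only (A sorts its argument in place, B does not mutate it).

-- ===== PORT A =====
def countItemRepeated (data : List (Int × Int)) : List (Int × Int) :=
  let sortedData := PySem.List.sorted data (fun item => item.2) false
  match PySem.List.pyGet? sortedData (-1) with
  | none => []   -- Python raises IndexError here (data = []); excluded by Pre_
  | some lastPair =>
      let lastItem := lastPair.2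
      sortedData.foldl (fun result item => if item.2 == lastItem then result ++ [item] else result) []

-- ===== PORT B =====
def countItemRepeated_alt (data : List (Int × Int)) : List (Int × Int) :=
  match PySem.List.max? (data.map (fun item => item.2)) (fun x => x) with
  | none => []   -- Python raises ValueError here (data = []); excluded by Pre_
  | some top => data.filter (fun item => item.2 == top)

-- ===== PRECONDITION & SPEC =====
-- Pre_ excludes exactly the empty list, on which A raises IndexError (data[-1]).
def Pre_countItemRepeated (data : List (Int × Int)) : Prop := data ≠ []
instance (data : List (Int × Int)) : Decidable (Pre_countItemRepeated data) := by unfold Pre_countItemRepeated; infer_instance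
def pvWitness_countItemRepeated : (List (Int × Int)) := [(1, 2), (3, 2), (4, 1)]

def Spec_countItemRepeated (data : List (Int × Int)) (out : List (Int × Int)) : Prop := out = countItemRepeated_alt data
instance (data : List (Int × Int)) (out : List (Int × Int)) : Decidable (Spec_countItemRepeated data out) := by unfold Spec_countItemRepeated; infer_instance

-- ===== CLAIM (what is proved, stated in full; the proofs are below) =====
def Claim_equal_countItemRepeated : Prop := ∀ (data : List (Int × Int)), Dom_countItemRepeated data → Pre_countItemRepeated data → Spec_countItemRepeated data (countItemRepeated data)

-- ===== LEMMAS AND PROOFS =====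

-- Inserting an element that fails the filter predicate does not change the filtered list.
theorem filter_insertBy_of_neg (before : Int × Int → Int × Int → Bool)
    (p : Int × Int → Bool) (x : Int × Int) (hx : p x = false) :
    ∀ (ys : List (Int × Int)), (PySem.List.insertBy before x ys).filter p = ys.filter p := by
  intro ys
  induction ys with
  | nil => simp [PySem.List.insertBy, hx]
  | cons y ys ih =>
      simp only [PySem.List.insertBy]
      split
      · simp [hx]
      · simp only [List.filter_cons]
        split <;> simp_all

-- Stability of the insertion-sort fold for elements carrying the maximal key m:
-- their filtered subsequence is the accumulator's followed by the remaining input's.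
theorem foldl_insertBy_filter_max (m : Int) :
    ∀ (rest acc : List (Int × Int)),
      (∀ a ∈ rest, a.2 ≤ m) → (∀ a ∈ acc, a.2 ≤ m) →
      ((rest.foldl (fun acc x => PySem.List.insertBy (fun a b => decide (a.2 < b.2)) x acc) acc).filter
          (fun a => a.2 == m))
        = acc.filter (fun a => a.2 == m) ++ rest.filter (fun a => a.2 == m) := by
  intro rest
  induction rest with
  | nil => intro acc _ _; simp
  | cons x rest ih =>
      intro acc hrest hacc
      have hx : x.2 ≤ m := hrest x (by simp)
      have hacc' : ∀ a ∈ PySem.List.insertBy (fun a b => decide (a.2 < b.2)) x acc, a.2 ≤ m := by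
        intro a ha
        rcases (PySem.List.mem_insertBy _ _ _ _).1 ha with h | h
        · exact h ▸ hx
        · exact hacc a h
      have step := ih (PySem.List.insertBy (fun a b => decide (a.2 < b.2)) x acc)
        (fun a ha => hrest a (by simp [ha])) hacc'
      simp only [List.foldl_cons]
      rw [step]
      by_cases hpx : x.2 = m
      · have hins : PySem.List.insertBy (fun a b => decide (a.2 < b.2)) x acc = acc ++ [x] := by
          apply PySem.List.insertBy_of_forall_not_before
          intro y hy
          have := hacc y hy
          simp only [decide_eq_false_iff_not]
          omega
        rw [hins]
        simp [List.filter_append, hpx]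
      · have hfx : (fun a : Int × Int => a.2 == m) x = false := by simp [hpx]
        rw [filter_insertBy_of_neg _ _ _ hfx]
        simp [hpx]

-- In a list pairwise-sorted by second component, every element's key is ≤ the last one's.
theorem le_getLast_snd
    (l : List (Int × Int)) (hl : l ≠ [])
    (hp : l.Pairwise (fun a b => a.2 ≤ b.2)) : ∀ x ∈ l, x.2 ≤ (l.getLast hl).2 := by
  intro x hx
  obtain ⟨i, hi, rfl⟩ := List.mem_iff_getElem.1 hx
  rw [List.getLast_eq_getElem]
  have hlen : 0 < l.length := List.length_pos_iff.2 hl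
  by_cases h : i = l.length - 1
  · subst h; exact le_refl _
  · exact (List.pairwise_iff_getElem.1 hp) i (l.length - 1) hi (by omega) (by omega)

theorem countItemRepeated_spec_aux (data : List (Int × Int)) (hne : data ≠ []) :
    countItemRepeated data = countItemRepeated_alt data := by
  -- name the max of the second components
  obtain ⟨m, hm⟩ : ∃ m, PySem.List.max? (data.map (fun item => item.2)) (fun x => x) = some m := by
    cases h : PySem.List.max? (data.map (fun item => item.2)) (fun x => x) with
    | none =>
        exact absurd ((PySem.List.max?_eq_none_iff _ _).1 h) (by simpa using hne)
    | some m => exact ⟨m, rfl⟩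
  have hmax : ∀ a ∈ data, a.2 ≤ m := by
    intro a ha
    exact PySem.List.max?_isMax hm a.2 (List.mem_map.2 ⟨a, ha, rfl⟩)
  have hmmem : ∃ a ∈ data, a.2 = m := by
    have := PySem.List.max?_mem hm
    rcases List.mem_map.1 this with ⟨a, ha, hav⟩
    exact ⟨a, ha, hav⟩
  set s := PySem.List.sorted data (fun item => item.2) false with hs
  have hsne : s ≠ [] := by
    intro h
    exact hne ((PySem.List.sorted_eq_nil_iff _ _ _).1 h)
  have hperm : s.Perm data := PySem.List.sorted_perm data (fun item => item.2) false
  have hpair : s.Pairwise (fun a b => a.2 ≤ b.2) := by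
    exact PySem.List.sorted_pairwise data (fun item : Int × Int => item.2)
  -- the last element of s carries the maximal key m
  have hlast_eq : (s.getLast hsne).2 = m := by
    have hmem : s.getLast hsne ∈ data := hperm.mem_iff.1 (List.getLast_mem hsne)
    have h1 : (s.getLast hsne).2 ≤ m := hmax _ hmem
    rcases hmmem with ⟨a, ha, hav⟩
    have h2 : a.2 ≤ (s.getLast hsne).2 :=
      le_getLast_snd s hsne hpair a (hperm.mem_iff.2 ha)
    omega
  -- evaluate A
  have hget : PySem.List.pyGet? s (-1) = some (s.getLast hsne) := by
    rw [PySem.List.pyGet?_neg_one]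
    exact List.getLast?_eq_some_getLast hsne
  have hA : countItemRepeated data
      = s.foldl (fun result item => if item.2 == m then result ++ [item] else result) [] := by
    show (match PySem.List.pyGet? s (-1) with
      | none => ([] : List (Int × Int))
      | some lastPair =>
          s.foldl (fun (result : List (Int × Int)) (item : Int × Int) =>
            if item.2 == lastPair.2 then result ++ [item] else result) [])
      = s.foldl (fun result item => if item.2 == m then result ++ [item] else result) []
    rw [hget]
    simp only [hlast_eq]
  -- fold with append-if is filter
  have hfold : s.foldl (fun result item => if item.2 == m then result ++ [item] else result) []
      = s.filter (fun item => item.2 == m) := by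
    simpa using PySem.List.foldl_append_if (fun item : Int × Int => item.2 == m) (fun item => item) s []
  -- stability: filtering the sorted list at the max key equals filtering the input
  have hstab : s.filter (fun item => item.2 == m) = data.filter (fun item => item.2 == m) := by
    rw [hs, PySem.List.sorted_eq_foldl_insertBy]
    have := foldl_insertBy_filter_max m data [] hmax (by simp)
    simpa using this
  unfold countItemRepeated_alt
  rw [hm, hA, hfold, hstab]

-- ===== VERDICT (by name: the statement is the Claim_ definition above) =====
theorem countItemRepeated_spec : Claim_equal_countItemRepeated := by
  intro data _ hpre
  exact countItemRepeated_spec_aux data hpre
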